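-- pv_equiv track=rewrite | github.com/scottxxxxx/ghostpour | app/services/meeting_report.py | _extract_first_paragraph
-- ===== SOURCE A (Python) =====
-- def _extract_first_paragraph(text: str, max_len: int = 300) -> str:
--     """Extract the first meaningful paragraph from an LLM response.
--
--     Skips markdown headers (# lines) and empty lines. Returns the first
--     block of substantive text, truncated to max_len.
--     """
--     lines = text.strip().split("\n")
--     paragraph = []
--     for line in lines:
--         stripped = line.strip()
--         # Skip markdown headers and empty lines at the start
--         if not paragraph and (not stripped or stripped.startswith("#")):
--             continue
--         # Stop at the next empty line or header after we've started collecting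
--         if paragraph and (not stripped or stripped.startswith("#")):
--             break
--         paragraph.append(stripped)
--
--     result = " ".join(paragraph).strip()
--     if not result:
--         # Fallback: just take the first non-empty line
--         for line in lines:
--             if line.strip():
--                 result = line.strip()
--                 break
--     if len(result) > max_len:
--         result = result[:max_len].rsplit(" ", 1)[0] + "..."
--     return result
-- ===== SOURCE B (Python) =====
-- # Run-length grouping rewrite: itertools.groupby partitions the stripped lines into
-- # maximal runs of substantive vs. skip lines; the answer is the first substantive
-- # run, instead of A's flag-driven continue/break scan. Same value on every input.
-- from itertools import groupby
--
--
-- def _extract_first_paragraph(text: str, max_len: int = 300) -> str: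
--     stripped = [line.strip() for line in text.strip().split("\n")]
--
--     def good(s):
--         return bool(s) and not s.startswith("#")
--
--     para = next((list(run) for key, run in groupby(stripped, good) if key), None)
--     if para is not None:
--         result = " ".join(para).strip()
--     else:
--         # Fallback: the first non-empty (stripped) line, possibly a header
--         result = next((s for s in stripped if s), "")
--     if len(result) > max_len:
--         result = result[:max_len].rsplit(" ", 1)[0] + "..."
--     return result
-- ===== Notes on version B (the rewrite author's own statement) =====
-- stated objective: idiomatic
-- what changed: A's flag-driven scan with continue/break is replaced by run-length grouping: itertools.groupby partitions the stripped lines into maximal runs of substantive vs skip lines and the result is the first run whose key is True, with the fallback as a generator over the stripped lines.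
import Mathlib
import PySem

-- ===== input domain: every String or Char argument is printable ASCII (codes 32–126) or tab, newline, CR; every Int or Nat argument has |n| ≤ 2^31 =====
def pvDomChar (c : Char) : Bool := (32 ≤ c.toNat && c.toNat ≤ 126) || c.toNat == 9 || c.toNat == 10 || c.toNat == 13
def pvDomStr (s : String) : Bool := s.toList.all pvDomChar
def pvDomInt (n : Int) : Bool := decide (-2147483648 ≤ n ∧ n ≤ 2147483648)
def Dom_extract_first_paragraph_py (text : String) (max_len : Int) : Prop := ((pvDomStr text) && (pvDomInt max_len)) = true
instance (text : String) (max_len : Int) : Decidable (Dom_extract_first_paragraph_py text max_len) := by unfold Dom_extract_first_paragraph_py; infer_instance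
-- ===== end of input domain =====

-- B replaces A's flag-driven continue/break scan by run-length grouping (itertools.groupby):
-- the answer is the first maximal run of substantive lines; same return value, no speed claim.

-- hand port of `.rsplit(" ", 1)[0]` (exact for any string): everything before the
-- last ' ', or the string itself when it contains no ' '.  Shared by both ports
-- because both Pythons contain the identical truncation line.
def pvRsplit1Head (cs : List Char) : List Char :=
  if cs.any (· == ' ') then ((cs.reverse.dropWhile (fun c => c ≠ ' ')).tail).reverse else cs

-- `result[:max_len].rsplit(" ", 1)[0] + "..."` under `len(result) > max_len`
def pvTrunc (res : List Char) (max_len : Int) : List Char :=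
  if (res.length : Int) > max_len then
    pvRsplit1Head (PySem.List.slice res none (some max_len)) ++ ['.', '.', '.']
  else res

-- ===== PORT A =====
def pvALoop : List (List Char) → List (List Char) → List (List Char)
  | [], para => para
  | line :: rest, para =>
    let s := PySem.Chars.strip line
    if para.isEmpty && (s.isEmpty || PySem.Chars.startswith s ['#']) then pvALoop rest para
    else if !para.isEmpty && (s.isEmpty || PySem.Chars.startswith s ['#']) then para
    else pvALoop rest (para ++ [s])

def pvAFallback : List (List Char) → List Char
  | [] => []
  | line :: rest =>
    if (PySem.Chars.strip line).isEmpty then pvAFallback rest else PySem.Chars.strip line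

def extract_first_paragraph_py (text : String) (max_len : Int) : String :=
  let lines := PySem.Chars.splitOn (PySem.Chars.strip text.toList) ['\n']
  let para := pvALoop lines []
  let result := PySem.Chars.strip (PySem.Chars.join [' '] para)
  let result := if result.isEmpty then pvAFallback lines else result
  String.ofList (pvTrunc result max_len)

-- ===== PORT B =====
def pvGood (s : List Char) : Bool := !s.isEmpty && !PySem.Chars.startswith s ['#']

-- hand port of itertools.groupby with key `pvGood`: the list of maximal runs of
-- consecutive lines sharing the key value, each tagged with that key.
def pvRuns : List (List Char) → List (Bool × List (List Char))
  | [] => []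
  | a :: t =>
    (pvGood a, a :: t.takeWhile (fun x => pvGood x == pvGood a)) ::
      pvRuns (t.dropWhile (fun x => pvGood x == pvGood a))
termination_by l => l.length
decreasing_by
  simpa using Nat.lt_succ_of_le (List.length_dropWhile_le _ _)

def extract_first_paragraph_py_alt (text : String) (max_len : Int) : String :=
  let ss := (PySem.Chars.splitOn (PySem.Chars.strip text.toList) ['\n']).map PySem.Chars.strip
  let result :=
    match (pvRuns ss).find? (fun p => p.1) with
    | some p => PySem.Chars.strip (PySem.Chars.join [' '] p.2)
    | none => (ss.find? (fun s => !s.isEmpty)).getD []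
  String.ofList (pvTrunc result max_len)

-- ===== PRECONDITION & SPEC =====
def Spec_extract_first_paragraph_py (text : String) (max_len : Int) (out : String) : Prop := out = extract_first_paragraph_py_alt text max_len
instance (text : String) (max_len : Int) (out : String) : Decidable (Spec_extract_first_paragraph_py text max_len out) := by unfold Spec_extract_first_paragraph_py; infer_instance

-- ===== CLAIM (what is proved, stated in full; the proofs are below) =====
def Claim_equal_extract_first_paragraph_py : Prop := ∀ (text : String) (max_len : Int), Dom_extract_first_paragraph_py text max_len → Spec_extract_first_paragraph_py text max_len (extract_first_paragraph_py text max_len)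

-- ===== LEMMAS AND PROOFS =====

lemma pvGood_eq_not_bad (s : List Char) :
    pvGood s = !(s.isEmpty || PySem.Chars.startswith s ['#']) := by
  simp [pvGood]

lemma pvALoop_ne_nil (lines : List (List Char)) (para : List (List Char)) (h : para ≠ []) :
    pvALoop lines para = para ++ (lines.map PySem.Chars.strip).takeWhile pvGood := by
  induction lines generalizing para with
  | nil => simp [pvALoop]
  | cons l rest ih =>
    simp only [pvALoop, List.map_cons, List.takeWhile_cons]
    have hpe : para.isEmpty = false := by simpa [List.isEmpty_iff] using h
    by_cases hb : (PySem.Chars.strip l).isEmpty || PySem.Chars.startswith (PySem.Chars.strip l) ['#']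
    · have hg : pvGood (PySem.Chars.strip l) = false := by
        rw [pvGood_eq_not_bad, hb]; rfl
      simp [hpe, hb, hg]
    · have hb' : ((PySem.Chars.strip l).isEmpty ||
          PySem.Chars.startswith (PySem.Chars.strip l) ['#']) = false := by
        simpa using hb
      have hg : pvGood (PySem.Chars.strip l) = true := by
        rw [pvGood_eq_not_bad, hb']; rfl
      simp only [hpe, hb', hg, Bool.and_false, if_neg Bool.false_ne_true, Bool.not_false]
      rw [ih (para ++ [PySem.Chars.strip l]) (by simp)]
      simp

lemma pvALoop_nil (lines : List (List Char)) :
    pvALoop lines [] =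
      ((lines.map PySem.Chars.strip).dropWhile (fun s => !pvGood s)).takeWhile pvGood := by
  induction lines with
  | nil => simp [pvALoop]
  | cons l rest ih =>
    simp only [pvALoop, List.map_cons, List.dropWhile_cons]
    by_cases hb : (PySem.Chars.strip l).isEmpty || PySem.Chars.startswith (PySem.Chars.strip l) ['#']
    · have hg : pvGood (PySem.Chars.strip l) = false := by
        rw [pvGood_eq_not_bad, hb]; rfl
      simp [hb, hg, ih]
    · have hb' : ((PySem.Chars.strip l).isEmpty ||
          PySem.Chars.startswith (PySem.Chars.strip l) ['#']) = false := by
        simpa using hb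
      have hg : pvGood (PySem.Chars.strip l) = true := by
        rw [pvGood_eq_not_bad, hb']; rfl
      simp only [List.isEmpty_nil, Bool.true_and, hb', if_neg Bool.false_ne_true,
        Bool.false_and, hg, Bool.not_true, List.takeWhile_cons]
      rw [List.nil_append, pvALoop_ne_nil rest [PySem.Chars.strip l] (by simp)]
      simp

lemma pvAFallback_eq (lines : List (List Char)) :
    pvAFallback lines = ((lines.map PySem.Chars.strip).find? (fun s => !s.isEmpty)).getD [] := by
  induction lines with
  | nil => simp [pvAFallback]
  | cons l rest ih =>
    simp only [pvAFallback, List.map_cons, List.find?_cons]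
    by_cases he : (PySem.Chars.strip l).isEmpty
    · simp [he, ih]
    · have : (PySem.Chars.strip l).isEmpty = false := by simpa using he
      simp [this]

lemma pv_dropWhile_cons_head_false {α : Type} {p : α → Bool} {l cs : List α} {c : α}
    (h : l.dropWhile p = c :: cs) : p c = false := by
  induction l with
  | nil => simp at h
  | cons a t ih =>
    rw [List.dropWhile_cons] at h
    by_cases hp : p a = true
    · rw [if_pos hp] at h; exact ih h
    · rw [if_neg hp] at h
      cases h
      simpa using hp

-- the first True-keyed run of the grouping is exactly drop-bad-prefix-then-take-good
lemma pvRuns_find (ss : List (List Char)) :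
    ((pvRuns ss).find? (fun p => p.1)).map Prod.snd =
      (if (ss.dropWhile (fun s => !pvGood s)).isEmpty then none
       else some ((ss.dropWhile (fun s => !pvGood s)).takeWhile pvGood)) := by
  induction ss using pvRuns.induct with
  | case1 => simp [pvRuns]
  | case2 a t ih =>
    rw [pvRuns]
    by_cases hg : pvGood a
    · simp only [List.find?_cons, hg, List.dropWhile_cons, Bool.not_true,
        if_neg Bool.false_ne_true, List.isEmpty_cons, List.takeWhile_cons]
      have : (fun x => pvGood x == pvGood a) = pvGood := by
        funext x; rw [hg]; simp
      simp [this]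
    · have hg' : pvGood a = false := by simpa using hg
      have hk : (fun x : List Char => pvGood x == false) = (fun s => !pvGood s) := by
        funext x; cases pvGood x <;> simp
      simp only [hg', hk] at ih ⊢
      simp only [List.find?_cons] at ih ⊢
      rw [ih]
      have hidem : (t.dropWhile (fun s => !pvGood s)).dropWhile (fun s => !pvGood s)
          = t.dropWhile (fun s => !pvGood s) := by
        cases hd : t.dropWhile (fun s => !pvGood s) with
        | nil => simp
        | cons x xs =>
          have hx : pvGood x = true := by
            have := pv_dropWhile_cons_head_false hd
            simpa using this
          simp [hx]
      rw [hidem]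
      simp [hg']

lemma strip_ne_nil_of_exists (cs : List Char)
    (h : ∃ c ∈ cs, PySem.Chars.isspace c = false) : PySem.Chars.strip cs ≠ [] := by
  obtain ⟨c, hc, hcs⟩ := h
  intro he
  simp only [PySem.Chars.strip, PySem.Chars.rstrip, PySem.Chars.lstrip] at he
  rw [List.reverse_eq_nil_iff, List.dropWhile_eq_nil_iff] at he
  have hmem : c ∈ (List.dropWhile PySem.Chars.isspace cs).reverse ∨
      PySem.Chars.isspace c = true := by
    rcases List.mem_append.mp
        (by rw [List.takeWhile_append_dropWhile]; exact hc :
          c ∈ cs.takeWhile PySem.Chars.isspace ++ cs.dropWhile PySem.Chars.isspace) with h1 | h2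
    · exact Or.inr (List.mem_takeWhile_imp h1)
    · exact Or.inl (List.mem_reverse.mpr h2)
  rcases hmem with h1 | h2
  · exact absurd (he c h1) (by simp [hcs])
  · simp [h2] at hcs

lemma exists_nonspace_of_strip_ne_nil (l : List Char) (h : PySem.Chars.strip l ≠ []) :
    ∃ c ∈ PySem.Chars.strip l, PySem.Chars.isspace c = false := by
  set w := PySem.Chars.lstrip l with hw
  have hpre : PySem.Chars.strip l <+: w := by
    simp only [PySem.Chars.strip, PySem.Chars.rstrip, ← hw]
    have : (w.reverse.dropWhile PySem.Chars.isspace) <:+ w.reverse := List.dropWhile_suffix _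
    have := List.reverse_prefix.mpr this
    simpa using this
  obtain ⟨t, ht⟩ := hpre
  cases hsl : PySem.Chars.strip l with
  | nil => exact absurd hsl h
  | cons c cs =>
    refine ⟨c, by simp, ?_⟩
    have hwc : w = c :: (cs ++ t) := by rw [← ht, hsl]; simp
    have hwd : l.dropWhile PySem.Chars.isspace = c :: (cs ++ t) := by
      rw [← hwc, hw]; rfl
    exact pv_dropWhile_cons_head_false hwd

lemma mem_join_head {c : Char} {s : List Char} (sep : List Char) (tw : List (List Char))
    (h : c ∈ s) : c ∈ PySem.Chars.join sep (s :: tw) := by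
  cases tw with
  | nil => simpa [PySem.Chars.join, List.intercalate] using h
  | cons u us =>
    rw [PySem.Chars.join, List.intercalate]
    simp only [List.intersperse]
    simp [h]

lemma strip_join_ne_nil (l : List Char) (tw : List (List Char))
    (h : PySem.Chars.strip l ≠ []) :
    PySem.Chars.strip (PySem.Chars.join [' '] (PySem.Chars.strip l :: tw)) ≠ [] := by
  obtain ⟨c, hc, hcs⟩ := exists_nonspace_of_strip_ne_nil l h
  exact strip_ne_nil_of_exists _ ⟨c, mem_join_head [' '] tw hc, hcs⟩

lemma pv_main (lines : List (List Char)) :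
    (let para := pvALoop lines [];
     let result := PySem.Chars.strip (PySem.Chars.join [' '] para);
     if result.isEmpty then pvAFallback lines else result) =
    (let ss := lines.map PySem.Chars.strip;
     match (pvRuns ss).find? (fun p => p.1) with
     | some p => PySem.Chars.strip (PySem.Chars.join [' '] p.2)
     | none => (ss.find? (fun s => !s.isEmpty)).getD []) := by
  simp only []
  have hfind := pvRuns_find (lines.map PySem.Chars.strip)
  set ss := lines.map PySem.Chars.strip with hss
  cases hf : (pvRuns ss).find? (fun p => p.1) with
  | none =>
    rw [hf] at hfind
    have hd : (ss.dropWhile (fun s => !pvGood s)).isEmpty = true := by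
      by_contra hcon
      rw [if_neg (by simpa using hcon)] at hfind; simp at hfind
    have hd' : ss.dropWhile (fun s => !pvGood s) = [] := by
      simpa [List.isEmpty_iff] using hd
    rw [pvALoop_nil, ← hss, hd']
    simp [PySem.Chars.join, PySem.Chars.strip, PySem.Chars.lstrip, PySem.Chars.rstrip,
      List.intercalate, pvAFallback_eq, ← hss]
  | some p =>
    rw [hf] at hfind
    cases hd : ss.dropWhile (fun s => !pvGood s) with
    | nil => rw [hd] at hfind; simp at hfind
    | cons x xs =>
      rw [hd] at hfind
      simp only [List.isEmpty_cons, if_neg Bool.false_ne_true, Option.map_some] at hfind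
      have hp2 : p.2 = (x :: xs).takeWhile pvGood := by
        simpa using hfind
      have hgx : pvGood x = true := by
        have := pv_dropWhile_cons_head_false hd
        simpa using this
      have hxmem : x ∈ ss := by
        have : x ∈ ss.dropWhile (fun s => !pvGood s) := by rw [hd]; simp
        exact (List.dropWhile_suffix _).subset this
      obtain ⟨l, _, hl⟩ := List.mem_map.mp (by rw [hss] at hxmem; exact hxmem)
      have hne : x ≠ [] := by
        intro h0; rw [h0] at hgx; simp [pvGood] at hgx
      rw [pvALoop_nil, ← hss, hd]
      simp only [List.takeWhile_cons, hgx] at hp2 ⊢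
      have hres : PySem.Chars.strip (PySem.Chars.join [' '] (x :: xs.takeWhile pvGood)) ≠ [] := by
        rw [← hl] at hne ⊢
        exact strip_join_ne_nil l _ hne
      rw [if_neg (by simpa [List.isEmpty_iff] using hres), hp2]

-- ===== VERDICT (by name: the statement is the Claim_ definition above) =====
theorem extract_first_paragraph_py_spec : Claim_equal_extract_first_paragraph_py := by
  intro text max_len _
  unfold Spec_extract_first_paragraph_py extract_first_paragraph_py extract_first_paragraph_py_alt
  simp only []
  rw [pv_main (PySem.Chars.splitOn (PySem.Chars.strip text.toList) ['\n'])]
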